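-- pv_equiv track=rewrite | github.com/3D-Printing-for-Microfluidics/pymfcad | router.py | _simplify_cardinal_path
-- ===== SOURCE A (Python) =====
-- def _simplify_cardinal_path(points):
--     # Remove any duplicate entries
--     tmp = [points[0]]
--     for point in points[1:]:
--         if point != tmp[-1]:
--             tmp.append(point)
--     points = tmp
--
--     # Keep only cardinal points
--     if len(points) <= 2:
--         return points[:]
--
--     simplified = [points[0], points[1]]
--     dx, dy, dz = tuple(ai - bi for ai, bi in zip(simplified[-1], simplified[-2]))
--
--     for i, p in enumerate(points):
--         if i < 2:
--             continue
--
--         ndx, ndy, ndz = tuple(ai - bi for ai, bi in zip(p, simplified[-1]))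
--         if (ndx, ndy, ndz) != (dx, dy, dz):
--             # Direction changed, keep current point
--             simplified.append(p)
--             dx, dy, dz = ndx, ndy, ndz
--         else:
--             simplified.pop()
--             simplified.append(p)
--     return simplified
-- ===== SOURCE B (Python) =====
-- def _simplify_cardinal_path(points):
--     # Same consecutive-duplicate removal, then a triple-window corner detector:
--     # keep the first and last deduped points, and an interior point exactly when
--     # its incoming step vector differs from its outgoing step vector.
--     dedup = []
--     for p in points:
--         if not dedup or dedup[-1] != p:
--             dedup.append(p)
--     if len(dedup) <= 2:
--         return dedup
--     steps = [tuple(a - b for a, b in zip(q, p)) for p, q in zip(dedup, dedup[1:])]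
--     mids = [q for q, s_in, s_out in zip(dedup[1:], steps, steps[1:]) if s_in != s_out]
--     return [dedup[0]] + mids + [dedup[-1]]
-- ===== Notes on version B (the rewrite author's own statement) =====
-- stated objective: simpler
-- what changed: B replaces A's stateful loop (which appends each point and pops the previous one back off when the step vector is unchanged, mutating a direction accumulator) with a stateless triple-window corner detector: after the same dedup pass it computes the consecutive step vectors once and keeps the first point, each interior point whose incoming step differs from its outgoing step, and the last point.
import Mathlib
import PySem

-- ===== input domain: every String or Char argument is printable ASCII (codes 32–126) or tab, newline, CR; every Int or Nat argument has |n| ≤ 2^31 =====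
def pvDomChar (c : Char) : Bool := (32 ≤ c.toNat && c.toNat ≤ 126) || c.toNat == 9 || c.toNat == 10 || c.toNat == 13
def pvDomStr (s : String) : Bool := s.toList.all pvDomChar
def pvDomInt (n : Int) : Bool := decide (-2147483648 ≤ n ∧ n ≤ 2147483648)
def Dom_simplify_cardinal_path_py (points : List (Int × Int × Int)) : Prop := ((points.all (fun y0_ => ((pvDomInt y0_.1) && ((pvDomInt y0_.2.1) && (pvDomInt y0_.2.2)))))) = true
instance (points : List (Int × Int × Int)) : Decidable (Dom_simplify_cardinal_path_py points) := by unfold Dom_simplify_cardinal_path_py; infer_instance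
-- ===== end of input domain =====

-- B replaces A's stateful pop/append loop with a stateless triple-window corner
-- detector over the step vectors of the deduped path (objective: simpler).


-- ===== PORT A =====
-- step vector: tuple(ai - bi for ai, bi in zip(q, p)), i.e. q - p componentwise
def pvStep (p q : Int × Int × Int) : Int × Int × Int :=
  (q.1 - p.1, q.2.1 - p.2.1, q.2.2 - p.2.2)

-- A's loop body; simplified is kept REVERSED (append = cons, [-1] = headI, pop = tail)
def pvAStep (st : List (Int × Int × Int) × (Int × Int × Int)) (p : Int × Int × Int) :
    List (Int × Int × Int) × (Int × Int × Int) :=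
  let nd := pvStep st.1.headI p
  if nd ≠ st.2 then (p :: st.1, nd) else (p :: st.1.tail, st.2)

def simplify_cardinal_path_py (points : List (Int × Int × Int)) : List (Int × Int × Int) :=
  match points with
  | [] => []  -- Python raises IndexError at points[0]; excluded by Pre_
  | p0 :: rest =>
    -- tmp accumulated reversed: tmp[-1] = acc.headI (tmp is never empty)
    let pts := (rest.foldl (fun acc point => if point ≠ acc.headI then point :: acc else acc) [p0]).reverse
    if pts.length ≤ 2 then pts
    else
      match pts with
      | q0 :: q1 :: rest2 =>
        ((rest2.foldl pvAStep ([q1, q0], pvStep q0 q1)).1).reverse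
      | _ => pts

-- ===== PORT B =====
def simplify_cardinal_path_py_alt (points : List (Int × Int × Int)) : List (Int × Int × Int) :=
  -- dedup accumulated reversed: dedup[-1] = acc.head?; 'not dedup' = acc.head? is none
  let dedup := (points.foldl (fun acc p => if acc = [] ∨ acc.head? ≠ some p then p :: acc else acc) []).reverse
  if dedup.length ≤ 2 then dedup
  else
    let steps := List.zipWith pvStep dedup dedup.tail
    let mids := (List.zip dedup.tail (List.zip steps steps.tail)).filterMap
      (fun x => if x.2.1 ≠ x.2.2 then some x.1 else none)
    [dedup.headI] ++ mids ++ [dedup.getLast!]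

-- ===== PRECONDITION & SPEC =====
-- Pre_ excludes only the empty list, on which Python A raises IndexError.
def Pre_simplify_cardinal_path_py (points : List (Int × Int × Int)) : Prop := points ≠ []
instance (points : List (Int × Int × Int)) : Decidable (Pre_simplify_cardinal_path_py points) := by unfold Pre_simplify_cardinal_path_py; infer_instance
def pvWitness_simplify_cardinal_path_py : (List (Int × Int × Int)) := [(0, 0, 0), (1, 0, 0), (2, 0, 0)]

def Spec_simplify_cardinal_path_py (points : List (Int × Int × Int)) (out : List (Int × Int × Int)) : Prop := out = simplify_cardinal_path_py_alt points
instance (points : List (Int × Int × Int)) (out : List (Int × Int × Int)) : Decidable (Spec_simplify_cardinal_path_py points out) := by unfold Spec_simplify_cardinal_path_py; infer_instance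

-- ===== CLAIM (what is proved, stated in full; the proofs are below) =====
def Claim_equal_simplify_cardinal_path_py : Prop := ∀ (points : List (Int × Int × Int)), Dom_simplify_cardinal_path_py points → Pre_simplify_cardinal_path_py points → Spec_simplify_cardinal_path_py points (simplify_cardinal_path_py points)

-- ===== LEMMAS AND PROOFS =====

-- The common value both loops compute: starting at point a with incoming step d,
-- keep a iff the next step differs from d, then continue.
def pvCore (a d : Int × Int × Int) : List (Int × Int × Int) → List (Int × Int × Int)
  | [] => [a]
  | q :: l => (if pvStep a q ≠ d then [a] else []) ++ pvCore q (pvStep a q) l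

theorem pvGetLast!_cons_cons (a q : Int × Int × Int) (l : List (Int × Int × Int)) :
    (a :: q :: l).getLast! = (q :: l).getLast! := by
  simp [List.getLast!, List.getLast]

-- A's fold realizes pvCore
theorem pvA_loop (l : List (Int × Int × Int)) :
    ∀ (a : Int × Int × Int) (s : List (Int × Int × Int)) (d : Int × Int × Int),
    ((l.foldl pvAStep (a :: s, d)).1).reverse = s.reverse ++ pvCore a d l := by
  induction l with
  | nil => intro a s d; simp [pvCore]
  | cons q l ih =>
    intro a s d
    simp only [List.foldl_cons, pvAStep, List.headI, pvCore]
    by_cases h : pvStep a q = d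
    · rw [if_neg (by simp [h]), if_neg (by simp [h]), List.tail_cons, ih q s d, h]
      simp
    · rw [if_pos h, if_pos h, ih q (a :: s) (pvStep a q)]
      simp

-- B's zip/filterMap expression realizes pvCore
theorem pvB_mids (l : List (Int × Int × Int)) :
    ∀ (a d : Int × Int × Int),
    (List.zip (a :: l) (List.zip (d :: List.zipWith pvStep (a :: l) l) (List.zipWith pvStep (a :: l) l))).filterMap
      (fun x => if x.2.1 ≠ x.2.2 then some x.1 else none) ++ [(a :: l).getLast!] = pvCore a d l := by
  induction l with
  | nil => intro a d; simp [pvCore, List.getLast!]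
  | cons q l ih =>
    intro a d
    simp only [List.zipWith_cons_cons, List.zip_cons_cons, List.filterMap_cons, pvCore]
    rw [pvGetLast!_cons_cons]
    by_cases h : pvStep a q = d
    · rw [if_neg (by simp [h]), if_neg (by simp [h])]
      rw [ih q (pvStep a q)]
      simp
    · rw [if_pos (fun e => h e.symm), if_pos h]
      rw [List.cons_append, ih q (pvStep a q)]
      simp

-- the two dedup folds agree (B's extra 'acc = []' disjunct is subsumed once acc is nonempty)
theorem pvDedup_eq (rest : List (Int × Int × Int)) :
    ∀ (acc : List (Int × Int × Int)), acc ≠ [] →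
    rest.foldl (fun acc p => if acc = [] ∨ acc.head? ≠ some p then p :: acc else acc) acc
      = rest.foldl (fun acc point => if point ≠ acc.headI then point :: acc else acc) acc := by
  induction rest with
  | nil => intro acc _; rfl
  | cons p rest ih =>
    intro acc hne
    obtain ⟨a, t, rfl⟩ := List.exists_cons_of_ne_nil hne
    simp only [List.foldl_cons]
    by_cases h : a = p
    · rw [if_neg (by simp [h]), if_neg (by simp [h])]
      exact ih (a :: t) (by simp)
    · rw [if_pos (Or.inr (by simp [h])), if_pos (by simp [List.headI]; exact fun e => h e.symm)]
      exact ih (p :: a :: t) (by simp)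

-- ===== VERDICT (by name: the statement is the Claim_ definition above) =====
theorem simplify_cardinal_path_py_spec : Claim_equal_simplify_cardinal_path_py := by
  intro points _ hpre
  unfold Spec_simplify_cardinal_path_py
  obtain ⟨p0, rest, rfl⟩ := List.exists_cons_of_ne_nil hpre
  simp only [simplify_cardinal_path_py, simplify_cardinal_path_py_alt]
  rw [List.foldl_cons, if_pos (Or.inl rfl), pvDedup_eq rest [p0] (by simp)]
  generalize (rest.foldl (fun acc point => if point ≠ acc.headI then point :: acc else acc) [p0]).reverse = pts
  by_cases hlen : pts.length ≤ 2
  · rw [if_pos hlen, if_pos hlen]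
  · rw [if_neg hlen, if_neg hlen]
    match pts, hlen with
    | [], h => exact absurd (by simp) h
    | [q], h => exact absurd (by simp) h
    | q0 :: q1 :: rest2, _ =>
      show (List.foldl pvAStep ([q1, q0], pvStep q0 q1) rest2).1.reverse = _
      rw [pvA_loop rest2 q1 [q0] (pvStep q0 q1)]
      simp only [List.headI, List.zipWith_cons_cons, List.tail]
      rw [pvGetLast!_cons_cons, List.append_assoc, pvB_mids rest2 q1 (pvStep q0 q1)]
      simp
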